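-- pv_equiv track=rewrite | github.com/csherlock4/budget-bot | bot.py | find_bucket_by_name
-- ===== SOURCE A (Python) =====
-- def find_bucket_by_name(data, name):
--     """Find a bucket by partial name match (case insensitive)"""
--     name_lower = name.lower()
--
--     # First try exact match
--     for emote, bucket in data['buckets'].items():
--         if bucket['name'].lower() == name_lower:
--             return emote, bucket
--
--     # Then try partial match
--     for emote, bucket in data['buckets'].items():
--         if name_lower in bucket['name'].lower():
--             return emote, bucket
--
--     return None, None
-- ===== SOURCE B (Python) =====
-- def find_bucket_by_name(data, name):
--     """Find a bucket by partial name match (case insensitive)"""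
--     name_lower = name.lower()
--     partial = None
--     for emote, bucket in data['buckets'].items():
--         bucket_lower = bucket['name'].lower()
--         if bucket_lower == name_lower:
--             return emote, bucket
--         if partial is None and name_lower in bucket_lower:
--             partial = (emote, bucket)
--     return partial if partial is not None else (None, None)
-- ===== Notes on version B (the rewrite author's own statement) =====
-- stated objective: alternative
-- what changed: Replaces A's two sequential passes (exact match, then partial match) by one fused pass that remembers the first partial match in an accumulator and still gives exact matches priority.
import Mathlib
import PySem

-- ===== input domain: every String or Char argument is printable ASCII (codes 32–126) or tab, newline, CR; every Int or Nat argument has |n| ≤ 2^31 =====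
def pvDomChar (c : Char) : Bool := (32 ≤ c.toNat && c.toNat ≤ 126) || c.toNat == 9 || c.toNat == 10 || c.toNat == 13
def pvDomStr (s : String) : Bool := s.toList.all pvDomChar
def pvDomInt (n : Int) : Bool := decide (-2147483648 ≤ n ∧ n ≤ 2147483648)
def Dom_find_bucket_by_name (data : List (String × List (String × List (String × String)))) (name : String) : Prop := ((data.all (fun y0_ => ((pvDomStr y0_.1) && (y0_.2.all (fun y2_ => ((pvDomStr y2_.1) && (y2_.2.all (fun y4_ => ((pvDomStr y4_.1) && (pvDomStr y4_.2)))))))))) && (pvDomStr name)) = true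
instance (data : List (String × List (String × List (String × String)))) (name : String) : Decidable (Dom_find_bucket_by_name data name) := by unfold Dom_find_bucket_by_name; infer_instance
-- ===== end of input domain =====

-- ===== PORT A =====
-- B changes A's decomposition: A makes two passes (exact, then partial); B makes one fused pass with an accumulator.
-- bucket['name'] (always present under Pre_ when reached by either Python; "" is a don't-care default outside that)
def pvBName (b : List (String × String)) : String := (PySem.Dict.get? (PySem.Dict.mk b) "name").getD ""

-- first loop of A: exact case-insensitive match
def pvFindExact (nl : String) : List (String × List (String × String)) → Option (String × List (String × String))
  | [] => none
  | (e, b) :: rest =>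
    if PySem.Str.lower (pvBName b) == nl then some (e, b) else pvFindExact nl rest

-- second loop of A: substring match
def pvFindPartial (nl : String) : List (String × List (String × String)) → Option (String × List (String × String))
  | [] => none
  | (e, b) :: rest =>
    if PySem.Str.isIn nl (PySem.Str.lower (pvBName b)) then some (e, b) else pvFindPartial nl rest

def find_bucket_by_name (data : List (String × List (String × List (String × String)))) (name : String) : Option String × (Option (List (String × String))) :=
  let nl := PySem.Str.lower name
  match PySem.Dict.get? (PySem.Dict.mk data) "buckets" with
  | none => (none, none)  -- KeyError in Python: excluded by Pre_
  | some bs =>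
    match pvFindExact nl bs with
    | some (e, b) => (some e, some b)
    | none =>
      match pvFindPartial nl bs with
      | some (e, b) => (some e, some b)
      | none => (none, none)

-- ===== PORT B =====
-- single pass: return at the first exact match, remember the first partial match in acc
def pvScan (nl : String) : List (String × List (String × String)) → Option (String × List (String × String)) → Option String × (Option (List (String × String)))
  | [], acc => match acc with | some (e, b) => (some e, some b) | none => (none, none)
  | (e, b) :: rest, acc =>
    let bl := PySem.Str.lower (pvBName b)
    if bl == nl then (some e, some b)
    else pvScan nl rest (if acc.isNone && PySem.Str.isIn nl bl then some (e, b) else acc)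

def find_bucket_by_name_alt (data : List (String × List (String × List (String × String)))) (name : String) : Option String × (Option (List (String × String))) :=
  let nl := PySem.Str.lower name
  match PySem.Dict.get? (PySem.Dict.mk data) "buckets" with
  | none => (none, none)  -- KeyError in Python: excluded by Pre_
  | some bs => pvScan nl bs none

-- ===== PRECONDITION & SPEC =====
-- Exactly where the Python A returns: data has a 'buckets' key, and every bucket lacking a 'name'
-- key comes strictly after some exact case-insensitive match (otherwise A raises KeyError there).
def Pre_find_bucket_by_name (data : List (String × List (String × List (String × String)))) (name : String) : Prop :=
  PySem.Dict.contains (PySem.Dict.mk data) "buckets" = true ∧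
  (∀ i : Fin ((PySem.Dict.get? (PySem.Dict.mk data) "buckets").getD []).length,
    PySem.Dict.contains (PySem.Dict.mk (((PySem.Dict.get? (PySem.Dict.mk data) "buckets").getD []).get i).2) "name" = false →
    ∃ j : Fin ((PySem.Dict.get? (PySem.Dict.mk data) "buckets").getD []).length, j.val < i.val ∧
      PySem.Str.lower (pvBName (((PySem.Dict.get? (PySem.Dict.mk data) "buckets").getD []).get j).2) = PySem.Str.lower name)
instance (data : List (String × List (String × List (String × String)))) (name : String) : Decidable (Pre_find_bucket_by_name data name) := by unfold Pre_find_bucket_by_name; infer_instance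

def pvWitness_find_bucket_by_name : (List (String × List (String × List (String × String)))) × String :=
  ([("buckets", [("e1", [("name", "Food")]), ("e2", [("name", "Bar")])])], "foo")

def Spec_find_bucket_by_name (data : List (String × List (String × List (String × String)))) (name : String) (out : Option String × (Option (List (String × String)))) : Prop := out = find_bucket_by_name_alt data name
instance (data : List (String × List (String × List (String × String)))) (name : String) (out : Option String × (Option (List (String × String)))) : Decidable (Spec_find_bucket_by_name data name out) := by unfold Spec_find_bucket_by_name; infer_instance

-- ===== CLAIM (what is proved, stated in full; the proofs are below) =====
def Claim_equal_find_bucket_by_name : Prop := ∀ (data : List (String × List (String × List (String × String)))) (name : String), Dom_find_bucket_by_name data name → Pre_find_bucket_by_name data name → Spec_find_bucket_by_name data name (find_bucket_by_name data name)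

-- ===== LEMMAS AND PROOFS =====

-- B's fused scan equals: A's exact pass first; otherwise the accumulator, else A's partial pass.
theorem pvScan_eq (nl : String) (l : List (String × List (String × String)))
    (acc : Option (String × List (String × String))) :
    pvScan nl l acc =
      match pvFindExact nl l with
      | some (e, b) => (some e, some b)
      | none =>
        match acc.or (pvFindPartial nl l) with
        | some (e, b) => (some e, some b)
        | none => (none, none) := by
  induction l generalizing acc with
  | nil => cases acc <;> rfl
  | cons hd rest ih =>
    obtain ⟨e, b⟩ := hd
    simp only [pvScan, pvFindExact, pvFindPartial]
    by_cases h : PySem.Str.lower (pvBName b) == nl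
    · simp [h]
    · simp only [h, ih]
      cases acc with
      | some a => simp
      | none =>
        by_cases hin : PySem.Chars.isIn nl.toList (PySem.Chars.lower (pvBName b).toList) = true <;>
          simp [PySem.Str.isIn, hin]

-- ===== VERDICT (by name: the statement is the Claim_ definition above) =====
theorem find_bucket_by_name_spec : Claim_equal_find_bucket_by_name := by
  intro data name _ _
  unfold Spec_find_bucket_by_name find_bucket_by_name find_bucket_by_name_alt
  cases PySem.Dict.get? (PySem.Dict.mk data) "buckets" with
  | none => rfl
  | some bs => simp only [pvScan_eq, Option.or]
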